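-- pv_equiv track=rewrite | github.com/PhilippRiegelmann/AoC2020 | 6/Advent_of_Code_6.py | sum_all_yes
-- ===== SOURCE A (Python) =====
-- def delete_duplications(input):
--     without_duplications = []
--     for i in range(len(input)):
--         without_duplications.append("")
--         for n in range(len(input[i][1])):
--             if input[i][1][n] not in without_duplications[-1]:
--                 without_duplications[-1] = without_duplications[-1] + input[i][1][n]
--     return without_duplications
--
-- def count_votes(letter, input):
--     count = 0
--     for i in range(len(input)):
--         if input[i] == letter:
--             count += 1
--     return count
--
-- def sum_all_yes(input):
--     different_answers = delete_duplications(input)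
--     sum = 0
--     for i in range(len(input)):
--         for n in range(len(different_answers[i])):
--             if count_votes(different_answers[i][n], input[i][1]) == input[i][0]:
--                 sum += 1
--     return sum
-- ===== SOURCE B (Python) =====
-- def sum_all_yes(input):
--     total = 0
--     for size, answers in input:
--         chars = sorted(answers)
--         n = len(chars)
--         i = 0
--         while i < n:
--             j = i
--             while j < n and chars[j] == chars[i]:
--                 j += 1
--             if j - i == size:
--                 total += 1
--             i = j
--     return total
-- ===== Notes on version B (the rewrite author's own statement) =====
-- stated objective: faster
-- what changed: Per group, sort the answer string once and count equal-letter runs whose length matches the group size in a single scan over the sorted characters, instead of A's deduplicate-then-rescan-the-whole-string-per-distinct-letter.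
import Mathlib
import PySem

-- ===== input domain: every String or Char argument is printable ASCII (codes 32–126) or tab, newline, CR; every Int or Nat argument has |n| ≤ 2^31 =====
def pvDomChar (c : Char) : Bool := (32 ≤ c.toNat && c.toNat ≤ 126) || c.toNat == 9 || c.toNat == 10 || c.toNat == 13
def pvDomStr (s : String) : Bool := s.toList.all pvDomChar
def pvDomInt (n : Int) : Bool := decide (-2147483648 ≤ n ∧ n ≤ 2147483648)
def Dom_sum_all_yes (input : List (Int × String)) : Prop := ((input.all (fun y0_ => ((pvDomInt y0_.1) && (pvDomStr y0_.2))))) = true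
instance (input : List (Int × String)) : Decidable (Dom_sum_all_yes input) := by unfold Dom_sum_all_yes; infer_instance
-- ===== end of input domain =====

-- B sorts each group's answers and counts maximal runs whose length equals the group
-- size in one scan, instead of A's "dedup the string, then rescan it once per distinct letter".

-- ===== PORT A =====
-- for each group, build the string of its distinct letters (first occurrences, in order)
def delete_duplications (input : List (Int × String)) : List (List Char) :=
  input.foldl (fun wd p =>
    wd ++ [p.2.toList.foldl
      (fun last ch => if last.contains ch then last else last ++ [ch]) []]) []

-- count occurrences of letter in the group's answer string
def count_votes (letter : Char) (input : List Char) : Int :=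
  input.foldl (fun count c => if c == letter then count + 1 else count) 0

def sum_all_yes (input : List (Int × String)) : Int :=
  let different_answers := delete_duplications input
  (input.zip different_answers).foldl (fun s p =>
    p.2.foldl (fun s ch => if count_votes ch p.1.2.toList == p.1.1 then s + 1 else s) s) 0

-- ===== PORT B =====
-- the run scan: 'while i < n: advance j over chars[j] == chars[i]; if j - i == size: total += 1; i = j'
def runScan (size : Int) (chars : List Char) : Int :=
  match chars with
  | [] => 0
  | c :: rest =>
    let run := rest.takeWhile (fun x => x == c)
    let rem := rest.dropWhile (fun x => x == c)
    (if ((1 : Int) + run.length) == size then 1 else 0) + runScan size rem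
termination_by chars.length
decreasing_by
  simpa using Nat.lt_succ_of_le (List.length_dropWhile_le _ _)

def sum_all_yes_alt (input : List (Int × String)) : Int :=
  input.foldl (fun total p =>
    total + runScan p.1 (PySem.List.sorted p.2.toList (fun c => c) false)) 0

-- ===== PRECONDITION & SPEC =====
def Spec_sum_all_yes (input : List (Int × String)) (out : Int) : Prop := out = sum_all_yes_alt input
instance (input : List (Int × String)) (out : Int) : Decidable (Spec_sum_all_yes input out) := by unfold Spec_sum_all_yes; infer_instance

-- ===== CLAIM (what is proved, stated in full; the proofs are below) =====
def Claim_equal_sum_all_yes : Prop := ∀ (input : List (Int × String)), Dom_sum_all_yes input → Spec_sum_all_yes input (sum_all_yes input)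

-- ===== LEMMAS AND PROOFS =====

-- A's inner dedup loop is exactly set-building: first occurrences in order
theorem dd_eq_map (input : List (Int × String)) :
    delete_duplications input = input.map (fun p => PySem.Set.ofList p.2.toList) := by
  unfold delete_duplications
  rw [PySem.List.foldl_append_singleton_eq_map]
  simp only [PySem.Set.ofList_eq_foldl]
  rfl

theorem count_votes_eq (letter : Char) (cs : List Char) :
    count_votes letter cs = (cs.count letter : Int) := by
  unfold count_votes
  rw [PySem.List.foldl_beq_add_one]
  simp

-- zipping a list with its own map folds like a single fold
theorem zip_map_foldl {α β γ : Type} (l : List α) (g : α → β)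
    (F : γ → α × β → γ) (init : γ) :
    (l.zip (l.map g)).foldl F init = l.foldl (fun s x => F s (x, g x)) init := by
  induction l generalizing init with
  | nil => rfl
  | cons x t ih => exact ih _

-- core lemma: on a sorted list l, the run scan counts exactly the distinct
-- elements (enumerated by any nodup list u with the same members) whose
-- multiplicity in l equals `size`
theorem runScan_sorted (size : Int) :
    ∀ (n : ℕ) (l u : List Char), l.length ≤ n → l.Pairwise (· ≤ ·) → u.Nodup →
      (∀ c, c ∈ u ↔ c ∈ l) →
      ((u.countP (fun c => (l.count c : Int) == size) : Nat) : Int) = runScan size l := by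
  intro n
  induction n with
  | zero =>
    intro l u hn _ _ hmem
    have hl : l = [] := List.eq_nil_of_length_eq_zero (Nat.le_zero.mp hn)
    subst hl
    have hu : u = [] := List.eq_nil_iff_forall_not_mem.mpr (fun c hc => by simpa using (hmem c).mp hc)
    subst hu
    simp [runScan]
  | succ n ih =>
    intro l u hn hs hnd hmem
    match l with
    | [] =>
      have hu : u = [] := List.eq_nil_iff_forall_not_mem.mpr (fun c hc => by simpa using (hmem c).mp hc)
      subst hu
      simp [runScan]
    | c :: rest =>
      rw [runScan]
      set t := rest.takeWhile (fun x => x == c) with ht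
      set r := rest.dropWhile (fun x => x == c) with hr
      have hsplit : rest = t ++ r := (List.takeWhile_append_dropWhile).symm
      have htc : ∀ x ∈ t, x = c := by
        intro x hx
        have := List.mem_takeWhile_imp hx
        simpa using this
      -- sortedness facts
      have hcle : ∀ x ∈ rest, c ≤ x := (List.pairwise_cons.mp hs).1
      have hrest : rest.Pairwise (· ≤ ·) := (List.pairwise_cons.mp hs).2
      have hrsorted : r.Pairwise (· ≤ ·) := by
        have := hsplit ▸ hrest
        exact (List.pairwise_append.mp this).2.1
      -- every element of r is strictly greater than c
      have hgt : ∀ x ∈ r, c < x := by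
        intro x hx
        match hr' : r with
        | [] => simp at hx
        | d :: r' =>
          have hdne : ¬ (d == c) = true := by
            have hh := List.head?_dropWhile_not (fun x => x == c) rest
            rw [← hr] at hh
            simpa using hh
          have hdc : d ≠ c := by simpa using hdne
          have hdlt : c < d := lt_of_le_of_ne
            (hcle d (by rw [hsplit]; simp)) (Ne.symm hdc)
          rcases List.mem_cons.mp hx with h | h
          · exact h ▸ hdlt
          · have : d ≤ x := (List.pairwise_cons.mp hrsorted).1 x h
            exact lt_of_lt_of_le hdlt this
      have hcnr : c ∉ r := fun h => lt_irrefl c (hgt c h)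
      -- multiplicities
      have hcount_c : (c :: rest).count c = 1 + t.length := by
        rw [hsplit]
        have htcnt : t.count c = t.length := List.count_eq_length.mpr (fun b hb => ((htc b hb).symm ▸ rfl))
        have hrcnt : r.count c = 0 := List.count_eq_zero.mpr hcnr
        simp [List.count_append, htcnt, hrcnt]
        omega
      have hcount_ne : ∀ d, d ≠ c → (c :: rest).count d = r.count d := by
        intro d hd
        rw [hsplit]
        have htcnt : t.count d = 0 := List.count_eq_zero.mpr (fun h => hd (htc d h))
        simp [List.count_append, htcnt, Ne.symm hd]
      -- u contains c; split it off
      have hcu : c ∈ u := (hmem c).mpr (List.mem_cons_self ..)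
      have hperm : u.Perm (c :: u.erase c) := List.perm_cons_erase hcu
      have hnd' : (u.erase c).Nodup := hnd.erase c
      have hmem' : ∀ d, d ∈ u.erase c ↔ d ∈ r := by
        intro d
        rw [hnd.mem_erase_iff]
        constructor
        · rintro ⟨hdc, hdu⟩
          have := (hmem d).mp hdu
          rcases List.mem_cons.mp this with h | h
          · exact absurd h hdc
          · rw [hsplit] at h
            rcases List.mem_append.mp h with h | h
            · exact absurd (htc d h) hdc
            · exact h
        · intro hdr
          have hdc : d ≠ c := fun h => hcnr (h ▸ hdr)
          exact ⟨hdc, (hmem d).mpr (List.mem_cons.mpr (Or.inr (hsplit ▸ List.mem_append.mpr (Or.inr hdr))))⟩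
      -- rewrite the countP over u
      rw [hperm.countP_eq]
      rw [List.countP_cons]
      have hpred' : (u.erase c).countP (fun d => ((c :: rest).count d : Int) == size)
          = (u.erase c).countP (fun d => (r.count d : Int) == size) := by
        apply List.countP_congr
        intro d hd
        have hdc : d ≠ c := (hnd.mem_erase_iff.mp hd).1
        rw [hcount_ne d hdc]
      rw [hpred']
      have hih := ih r (u.erase c) (by
          have h1 : r.length ≤ rest.length := List.length_dropWhile_le _ _
          have h2 : (c :: rest).length = rest.length + 1 := by simp
          omega) hrsorted hnd' hmem'
      rw [← hih]
      have hco : (((c :: rest).count c : Int) == size) = (((1 : Int) + t.length) == size) := by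
        rw [hcount_c]; push_cast; ring_nf
      rw [hco]
      by_cases h : ((1 : Int) + t.length) == size
      · simp [h]; ring
      · simp [h]

-- B's per-group contribution equals A's per-group inner loop
theorem group_eq (k : Int) (s : String) (acc : Int) :
    (PySem.Set.ofList s.toList).foldl
      (fun s' ch => if count_votes ch s.toList == k then s' + 1 else s') acc
    = acc + runScan k (PySem.List.sorted s.toList (fun c => c) false) := by
  rw [PySem.List.foldl_if_add_one]
  congr 1
  set srt := PySem.List.sorted s.toList (fun c => c) false with hsrt
  have hperm : srt.Perm s.toList := PySem.List.sorted_perm ..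
  have hpair : srt.Pairwise (· ≤ ·) := by
    have := PySem.List.sorted_pairwise (xs := s.toList) (key := fun c => c)
    simpa using this
  have hpred : (PySem.Set.ofList s.toList).countP (fun ch => count_votes ch s.toList == k)
      = (PySem.Set.ofList s.toList).countP (fun ch => (srt.count ch : Int) == k) := by
    apply List.countP_congr
    intro d _
    rw [count_votes_eq, hperm.count_eq]
  rw [hpred]
  exact runScan_sorted k srt.length srt (PySem.Set.ofList s.toList) le_rfl hpair
    (PySem.Set.nodup_ofList _)
    (fun d => by rw [PySem.Set.mem_ofList, ← hperm.mem_iff])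

-- ===== VERDICT (by name: the statement is the Claim_ definition above) =====
theorem sum_all_yes_spec : Claim_equal_sum_all_yes := by
  intro input _
  show sum_all_yes input = sum_all_yes_alt input
  unfold sum_all_yes sum_all_yes_alt
  rw [dd_eq_map, zip_map_foldl]
  apply PySem.List.foldl_congr_mem
  intro acc p _
  exact group_eq p.1 p.2 acc
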